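-- pv_equiv track=rewrite | github.com/Shagunaawasthi/AuthoritySpoke | spoke.py | match_entity_roles
-- ===== SOURCE A (Python) =====
-- def match_entity_roles(self_entities, other_entities):
--     """Make a temporary dict for information from other.
--     For each entity slot in each factor in self, check the matching
--     entity slot in other. If it contains something that's not already
--     in the temp dict, add it and the corresponding symbol from self
--     as a key and value. If it contains something that the temp dict
--     doesn't match to self's value for that slot, return False. If
--     none of the slots return False, return True."""
--
--     entity_roles = {}
--
--     if len(self_entities) != len(other_entities):
--         return False
--
--     entity_pairs = zip(self_entities, other_entities)
--     for pair in entity_pairs: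
--         if pair[0] not in entity_roles:
--             entity_roles[pair[0]] = pair[1]
--         if entity_roles[pair[0]] != pair[1]:
--             return False
--
--     return True
-- ===== SOURCE B (Python) =====
-- def match_entity_roles(self_entities, other_entities):
--     if len(self_entities) != len(other_entities):
--         return False
--     groups = {}
--     for a, b in zip(self_entities, other_entities):
--         groups.setdefault(a, []).append(b)
--     return all(len(set(vs)) == 1 for vs in groups.values())
-- ===== Notes on version B (the rewrite author's own statement) =====
-- stated objective: alternative
-- what changed: replaced the interleaved record-first-value-and-compare single pass over the zipped pairs by a two-phase shape: one grouping pass building a dict from each self-entity to the list of other-entities paired with it, then a separate verification pass checking every group collapses to a single distinct value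
import Mathlib
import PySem

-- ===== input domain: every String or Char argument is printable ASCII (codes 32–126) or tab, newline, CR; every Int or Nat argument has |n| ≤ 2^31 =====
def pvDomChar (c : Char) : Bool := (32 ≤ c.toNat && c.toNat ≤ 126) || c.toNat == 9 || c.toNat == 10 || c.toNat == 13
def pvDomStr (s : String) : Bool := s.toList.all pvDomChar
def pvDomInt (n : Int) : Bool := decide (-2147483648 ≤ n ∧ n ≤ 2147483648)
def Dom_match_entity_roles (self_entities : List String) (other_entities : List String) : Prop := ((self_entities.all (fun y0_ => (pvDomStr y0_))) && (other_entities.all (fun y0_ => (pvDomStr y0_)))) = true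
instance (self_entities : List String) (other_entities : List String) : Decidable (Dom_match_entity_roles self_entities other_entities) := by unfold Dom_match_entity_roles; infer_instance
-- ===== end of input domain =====

-- B replaces A's interleaved first-value-and-compare pass by a group-then-verify two-phase pass (alternative decomposition, same cost).

-- ===== PORT A =====
-- the 'for pair in entity_pairs' loop with its early 'return False'
def merLoopA : List (String × String) → PySem.Dict String String → Bool
  | [], _ => true
  | p :: rest, d =>
    -- 'if pair[0] not in entity_roles: entity_roles[pair[0]] = pair[1]'
    let d' := if d.contains p.1 then d else d.insert p.1 p.2
    -- 'if entity_roles[pair[0]] != pair[1]: return False' (the key is always present here)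
    if d'.get? p.1 ≠ some p.2 then false else merLoopA rest d'

def match_entity_roles (self_entities : List String) (other_entities : List String) : Bool :=
  if self_entities.length ≠ other_entities.length then false
  else merLoopA (self_entities.zip other_entities) PySem.Dict.empty

-- ===== PORT B =====
def match_entity_roles_alt (self_entities : List String) (other_entities : List String) : Bool :=
  if self_entities.length ≠ other_entities.length then false
  else
    -- phase 1: group each self-entity with the list of other-entities paired with it
    -- phase 2: every group must hold exactly one distinct value
    ((self_entities.zip other_entities).foldl
        (fun d p => d.modify p.1 [] (fun vs => vs ++ [p.2])) PySem.Dict.empty).values.all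
      (fun vs => PySem.Set.len (PySem.Set.ofList vs) == 1)

-- ===== PRECONDITION & SPEC =====
def Spec_match_entity_roles (self_entities : List String) (other_entities : List String) (out : Bool) : Prop := out = match_entity_roles_alt self_entities other_entities
instance (self_entities : List String) (other_entities : List String) (out : Bool) : Decidable (Spec_match_entity_roles self_entities other_entities out) := by unfold Spec_match_entity_roles; infer_instance

-- ===== CLAIM (what is proved, stated in full; the proofs are below) =====
def Claim_equal_match_entity_roles : Prop := ∀ (self_entities : List String) (other_entities : List String), Dom_match_entity_roles self_entities other_entities → Spec_match_entity_roles self_entities other_entities (match_entity_roles self_entities other_entities)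

-- ===== LEMMAS AND PROOFS =====

-- the values paired with key k in the pair list
def valsOf (pairs : List (String × String)) (k : String) : List String :=
  (pairs.filter (fun p => p.1 == k)).map (·.2)

def allSame (l : List String) : Prop := ∀ a ∈ l, ∀ b ∈ l, a = b

theorem valsOf_cons (a b : String) (rest : List (String × String)) (k : String) :
    valsOf ((a, b) :: rest) k = if a = k then b :: valsOf rest k else valsOf rest k := by
  simp [valsOf, List.filter_cons]
  split_ifs with h <;> simp_all

theorem allSame_cons_self (v : String) (l : List String) :
    allSame (v :: v :: l) ↔ allSame (v :: l) := by
  unfold allSame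
  refine ⟨fun h a ha b hb => h a ?_ b ?_, fun h a ha b hb => h a ?_ b ?_⟩ <;>
    simp_all [List.mem_cons]

-- characterisation of A's loop
theorem merLoopA_iff (pairs : List (String × String)) (d : PySem.Dict String String) :
    merLoopA pairs d = true ↔
      ∀ k : String, allSame ((d.get? k).toList ++ valsOf pairs k) := by
  induction pairs generalizing d with
  | nil =>
    simp only [merLoopA, valsOf, List.filter_nil, List.map_nil, List.append_nil, true_iff]
    intro k a ha b hb
    cases hd : d.get? k <;> simp_all
  | cons p rest ih =>
    obtain ⟨a, b⟩ := p
    by_cases hc : d.contains a = true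
    · -- key already present with some value v
      obtain ⟨v, hv⟩ : ∃ v, d.get? a = some v := by
        have := PySem.Dict.contains_eq_isSome_get? d a
        rw [hc] at this
        exact Option.isSome_iff_exists.1 this.symm
      by_cases hvb : v = b
      · subst hvb
        simp only [merLoopA, hc, if_true, hv]
        rw [if_neg (by simp)]
        rw [ih]
        constructor
        · intro h k
          rw [valsOf_cons]
          split_ifs with hk
          · cases hk
            have := h a
            rw [hv] at this ⊢
            simp only [Option.toList_some, List.singleton_append] at this ⊢
            exact (allSame_cons_self _ _).2 this
          · exact h k
        · intro h k
          have := h k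
          rw [valsOf_cons] at this
          split_ifs at this with hk
          · cases hk
            rw [hv] at this ⊢
            simp only [Option.toList_some, List.singleton_append] at this ⊢
            exact (allSame_cons_self _ _).1 this
          · exact this
      · simp only [merLoopA, hc, if_true, hv]
        rw [if_pos (by simpa using hvb)]
        simp only [Bool.false_eq_true, false_iff, not_forall]
        refine ⟨a, fun h => ?_⟩
        rw [hv, valsOf_cons, if_pos rfl] at h
        simp only [Option.toList_some, List.singleton_append] at h
        exact hvb (h v (by simp) b (by simp))
    · -- fresh key: insert, check passes
      have hc' : d.contains a = false := by simpa using hc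
      have hg : d.get? a = none := by
        have := PySem.Dict.contains_eq_isSome_get? d a
        rw [hc'] at this
        cases hx : d.get? a
        · rfl
        · rw [hx] at this; simp at this
      simp only [merLoopA, hc', Bool.false_eq_true, if_false]
      rw [if_neg (by simp [PySem.Dict.get?_insert_self])]
      rw [ih]
      constructor
      · intro h k
        rw [valsOf_cons]
        split_ifs with hk
        · have := h k
          rw [← hk] at this ⊢
          rw [PySem.Dict.get?_insert_self] at this
          rw [hg]
          simpa using this
        · have := h k
          rw [PySem.Dict.get?_insert_of_ne d b (fun e => hk e.symm)] at this
          exact this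
      · intro h k
        by_cases hk : k = a
        · rw [hk, PySem.Dict.get?_insert_self]
          have := h a
          rw [valsOf_cons, if_pos rfl, hg] at this
          simpa using this
        · rw [PySem.Dict.get?_insert_of_ne d b hk]
          have := h k
          rw [valsOf_cons, if_neg (fun e => hk e.symm)] at this
          exact this

-- a set built from l has exactly one element iff l is nonempty and constant
theorem setOfList_length_one_iff (l : List String) :
    ((PySem.Set.ofList l).length = 1) ↔ (l ≠ [] ∧ allSame l) := by
  constructor
  · intro h
    obtain ⟨v, hv⟩ := List.length_eq_one_iff.1 h
    have hmem : ∀ x, x ∈ l ↔ x = v := by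
      intro x
      rw [← PySem.Set.mem_ofList (xs := l), hv]; simp
    constructor
    · intro hnil
      have : v ∈ l := (hmem v).2 rfl
      simp [hnil] at this
    · intro x hx y hy
      rw [(hmem x).1 hx, (hmem y).1 hy]
  · rintro ⟨hne, hs⟩
    obtain ⟨v, t, rfl⟩ := List.exists_cons_of_ne_nil hne
    have hone : PySem.Set.ofList (v :: t) = [v] := by
      have hnd := PySem.Set.nodup_ofList (v :: t)
      have hmem : ∀ x, x ∈ PySem.Set.ofList (v :: t) ↔ x = v := by
        intro x
        rw [PySem.Set.mem_ofList]
        constructor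
        · intro hx; exact hs x hx v (by simp)
        · rintro rfl; simp
      cases hq : PySem.Set.ofList (v :: t) with
      | nil => exact absurd ((hmem v).2 rfl) (by simp [hq])
      | cons y ys =>
        have hy : y = v := (hmem y).1 (by simp [hq])
        subst hy
        cases hys : ys with
        | nil => rfl
        | cons z zs =>
          have hz : z = y := (hmem z).1 (by simp [hq, hys])
          rw [hq, hys] at hnd
          simp [hz] at hnd
    simp [hone]

theorem valsOf_ne_nil_of_mem (pairs : List (String × String)) (k : String)
    (h : k ∈ pairs.map (·.1)) : valsOf pairs k ≠ [] := by
  obtain ⟨p, hp, hk⟩ := List.mem_map.1 h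
  simp only [valsOf, ne_eq, List.map_eq_nil_iff, List.filter_eq_nil_iff]
  intro hf
  exact (hf p hp) (by simp [hk])

-- ===== VERDICT (by name: the statement is the Claim_ definition above) =====
theorem match_entity_roles_spec : Claim_equal_match_entity_roles := by
  intro xs ys _
  unfold Spec_match_entity_roles match_entity_roles match_entity_roles_alt
  by_cases hlen : xs.length ≠ ys.length
  · simp [hlen]
  · rw [if_neg hlen, if_neg hlen]
    set pairs := xs.zip ys with hp
    rw [Bool.eq_iff_iff, merLoopA_iff]
    have hnd : (pairs.foldl (fun d p => d.modify p.1 [] (fun vs => vs ++ [p.2])) PySem.Dict.empty).keys.Nodup :=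
      PySem.Dict.nodup_keys_foldl_modify_key pairs (fun p => p.1) []
        (fun _ p => (fun vs => vs ++ [p.2])) PySem.Dict.empty (by simp)
    have hkeys : (pairs.foldl (fun d p => d.modify p.1 [] (fun vs => vs ++ [p.2])) PySem.Dict.empty).keys
        = PySem.Set.ofList (pairs.map (·.1)) := by
      have := PySem.Dict.keys_foldl_modify_key (l := pairs) (key := fun p => p.1) (d0 := [])
        (f := fun _ p => (fun vs => vs ++ [p.2])) (d := PySem.Dict.empty)
      simpa [PySem.Set.ofList, PySem.Set.update, PySem.Dict.keys_empty] using this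
    have hgetD : ∀ k, (pairs.foldl (fun d p => d.modify p.1 [] (fun vs => vs ++ [p.2])) PySem.Dict.empty).getD k []
        = valsOf pairs k := by
      intro k
      have := PySem.Dict.getD_foldl_modify_append (l := pairs) (d := PySem.Dict.empty) (c := k)
      simpa [valsOf, PySem.Dict.getD_empty] using this
    rw [PySem.Dict.values_eq_map_keys _ hnd [], hkeys, List.all_map, List.all_eq_true]
    constructor
    · intro h k hk
      have hk' : k ∈ pairs.map (·.1) := (PySem.Set.mem_ofList _ _).1 hk
      have hvk := h k
      simp only [PySem.Dict.get?_empty, Option.toList_none, List.nil_append] at hvk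
      simp only [Function.comp, hgetD k, PySem.Set.len, beq_iff_eq]
      exact_mod_cast (setOfList_length_one_iff _).2 ⟨valsOf_ne_nil_of_mem pairs k hk', hvk⟩
    · intro h k
      simp only [PySem.Dict.get?_empty, Option.toList_none, List.nil_append]
      by_cases hk : k ∈ pairs.map (·.1)
      · have := h k ((PySem.Set.mem_ofList _ _).2 hk)
        simp only [Function.comp, hgetD k, PySem.Set.len, beq_iff_eq] at this
        have hlen1 : ((PySem.Set.ofList (valsOf pairs k)).length = 1) := by
          exact_mod_cast this
        exact ((setOfList_length_one_iff _).1 hlen1).2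
      · have hnil : valsOf pairs k = [] := by
          simp only [valsOf, List.map_eq_nil_iff, List.filter_eq_nil_iff]
          intro p hp hpk
          exact hk (List.mem_map.2 ⟨p, hp, by simpa using hpk⟩)
        rw [hnil]; intro a ha; simp at ha
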